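-- pv_equiv track=rewrite | github.com/mr-iakio/datacenter | ODC.py | checkNextSlots
-- ===== SOURCE A (Python) =====
-- def checkNextSlots(dataCenter, ServerSize, row, col):
--     state = 1
--     for cS in list(range(0, ServerSize)):
--         occ = [row, col + cS] in dataCenter
--         if occ:
--             state = 0
--             break
--
--     return state
-- ===== SOURCE B (Python) =====
-- def checkNextSlots(dataCenter, ServerSize, row, col):
--     # single pass over dataCenter with a half-open range check instead of
--     # ServerSize membership scans
--     for e in dataCenter:
--         if len(e) == 2 and e[0] == row and col <= e[1] < col + ServerSize:
--             return 0
--     return 1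
-- ===== Notes on version B (the rewrite author's own statement) =====
-- stated objective: faster
-- what changed: B makes one pass over dataCenter with a half-open range test col <= e[1] < col+ServerSize instead of A's loop over ServerSize slots each doing a full membership scan of dataCenter.
import Mathlib
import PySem

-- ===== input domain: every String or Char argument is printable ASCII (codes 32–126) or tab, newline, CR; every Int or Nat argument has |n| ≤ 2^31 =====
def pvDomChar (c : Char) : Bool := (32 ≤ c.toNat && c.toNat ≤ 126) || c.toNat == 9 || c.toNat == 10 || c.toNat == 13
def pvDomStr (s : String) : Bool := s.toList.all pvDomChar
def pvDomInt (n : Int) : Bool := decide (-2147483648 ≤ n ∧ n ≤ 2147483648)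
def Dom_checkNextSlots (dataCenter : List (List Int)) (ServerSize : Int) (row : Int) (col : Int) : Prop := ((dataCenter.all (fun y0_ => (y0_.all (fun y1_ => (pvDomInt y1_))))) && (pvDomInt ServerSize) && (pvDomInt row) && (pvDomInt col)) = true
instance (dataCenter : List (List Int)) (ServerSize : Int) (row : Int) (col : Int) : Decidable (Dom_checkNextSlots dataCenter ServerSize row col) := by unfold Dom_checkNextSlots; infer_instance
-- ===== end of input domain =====

-- B replaces A's ServerSize membership scans by one pass over dataCenter with a range check (faster).


-- ===== PORT A =====
-- loop 'for cS in range(0, ServerSize): if [row, col+cS] in dataCenter: state=0; break'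
def checkNextSlotsGoA (dataCenter : List (List Int)) (row : Int) (col : Int) : List Int → Int
  | [] => 1
  | cS :: rest =>
    if [row, col + cS] ∈ dataCenter then 0 else checkNextSlotsGoA dataCenter row col rest

def checkNextSlots (dataCenter : List (List Int)) (ServerSize : Int) (row : Int) (col : Int) : Int :=
  checkNextSlotsGoA dataCenter row col (PySem.List.pyRange 0 ServerSize 1)

-- ===== PORT B =====
-- loop 'for e in dataCenter: if len(e)==2 and e[0]==row and col <= e[1] < col+ServerSize: return 0'
def checkNextSlotsGoB (ServerSize : Int) (row : Int) (col : Int) : List (List Int) → Int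
  | [] => 1
  | e :: rest =>
    match e with
    | [a, b] =>
      if a = row ∧ col ≤ b ∧ b < col + ServerSize then 0
      else checkNextSlotsGoB ServerSize row col rest
    | _ => checkNextSlotsGoB ServerSize row col rest

def checkNextSlots_alt (dataCenter : List (List Int)) (ServerSize : Int) (row : Int) (col : Int) : Int :=
  checkNextSlotsGoB ServerSize row col dataCenter

-- ===== PRECONDITION & SPEC =====
def Spec_checkNextSlots (dataCenter : List (List Int)) (ServerSize : Int) (row : Int) (col : Int) (out : Int) : Prop := out = checkNextSlots_alt dataCenter ServerSize row col
instance (dataCenter : List (List Int)) (ServerSize : Int) (row : Int) (col : Int) (out : Int) : Decidable (Spec_checkNextSlots dataCenter ServerSize row col out) := by unfold Spec_checkNextSlots; infer_instance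

-- ===== CLAIM (what is proved, stated in full; the proofs are below) =====
def Claim_equal_checkNextSlots : Prop := ∀ (dataCenter : List (List Int)) (ServerSize : Int) (row : Int) (col : Int), Dom_checkNextSlots dataCenter ServerSize row col → Spec_checkNextSlots dataCenter ServerSize row col (checkNextSlots dataCenter ServerSize row col)

-- ===== LEMMAS AND PROOFS =====

theorem goA_eq_one_iff (dc : List (List Int)) (row col : Int) (l : List Int) :
    checkNextSlotsGoA dc row col l = 1 ↔ ∀ cS ∈ l, [row, col + cS] ∉ dc := by
  induction l with
  | nil => simp [checkNextSlotsGoA]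
  | cons cS rest ih =>
    simp only [checkNextSlotsGoA]
    split_ifs with h
    · simp [h]
    · simp [h, ih]

theorem goA_val (dc : List (List Int)) (row col : Int) (l : List Int) :
    checkNextSlotsGoA dc row col l = 0 ∨ checkNextSlotsGoA dc row col l = 1 := by
  induction l with
  | nil => simp [checkNextSlotsGoA]
  | cons cS rest ih =>
    simp only [checkNextSlotsGoA]
    split_ifs with h
    · exact Or.inl rfl
    · exact ih

theorem goB_eq_one_iff (S row col : Int) (dc : List (List Int)) :
    checkNextSlotsGoB S row col dc = 1 ↔
      ∀ e ∈ dc, ∀ b : Int, e = [row, b] → ¬ (col ≤ b ∧ b < col + S) := by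
  induction dc with
  | nil => simp [checkNextSlotsGoB]
  | cons e rest ih =>
    match e with
    | [] => simp only [checkNextSlotsGoB]; simp [ih]
    | [a] => simp only [checkNextSlotsGoB]; simp [ih]
    | a :: b :: c :: t => simp only [checkNextSlotsGoB]; simp [ih]
    | [a, b] =>
      simp only [checkNextSlotsGoB]
      split_ifs with h
      · obtain ⟨ha, hb⟩ := h
        constructor
        · intro habs; exact absurd habs (by norm_num)
        · intro hall
          exact absurd hb (hall [a, b] (by simp) b (by simp [ha]))
      · simp only [List.mem_cons, ih]
        constructor
        · intro hall e' he' b' he'b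
          rcases he' with he' | he'
          · subst he'
            intro hc
            apply h
            injection he'b with h1 h2
            injection h2 with h2 _
            exact ⟨h1, h2 ▸ hc⟩
          · exact hall e' he' b' he'b
        · intro hall e' he' b' he'b
          exact hall e' (Or.inr he') b' he'b

theorem goB_val (S row col : Int) (dc : List (List Int)) :
    checkNextSlotsGoB S row col dc = 0 ∨ checkNextSlotsGoB S row col dc = 1 := by
  induction dc with
  | nil => simp [checkNextSlotsGoB]
  | cons e rest ih =>
    match e with
    | [] => simpa [checkNextSlotsGoB] using ih
    | [a] => simpa [checkNextSlotsGoB] using ih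
    | a :: b :: c :: t => simpa [checkNextSlotsGoB] using ih
    | [a, b] =>
      simp only [checkNextSlotsGoB]
      split_ifs with h
      · exact Or.inl rfl
      · exact ih

theorem occ_iff (dc : List (List Int)) (S row col : Int) :
    (∀ cS ∈ PySem.List.pyRange 0 S 1, [row, col + cS] ∉ dc) ↔
      (∀ e ∈ dc, ∀ b : Int, e = [row, b] → ¬ (col ≤ b ∧ b < col + S)) := by
  constructor
  · intro h e he b heb hc
    subst heb
    have := h (b - col) (by rw [PySem.List.mem_pyRange_one]; omega)
    apply this
    have : col + (b - col) = b := by omega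
    rw [this]; exact he
  · intro h cS hcS hmem
    rw [PySem.List.mem_pyRange_one] at hcS
    exact h [row, col + cS] hmem (col + cS) rfl ⟨by omega, by omega⟩

-- ===== VERDICT (by name: the statement is the Claim_ definition above) =====
theorem checkNextSlots_spec : Claim_equal_checkNextSlots := by
  intro dc S row col _
  unfold Spec_checkNextSlots checkNextSlots checkNextSlots_alt
  have hA := goA_eq_one_iff dc row col (PySem.List.pyRange 0 S 1)
  have hB := goB_eq_one_iff S row col dc
  have key := occ_iff dc S row col
  rcases goA_val dc row col (PySem.List.pyRange 0 S 1) with h0 | h1 <;>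
  rcases goB_val S row col dc with g0 | g1
  · rw [h0, g0]
  · exfalso
    have h1' := hA.mpr (key.mpr (hB.mp g1))
    rw [h0] at h1'
    exact absurd h1' (by norm_num)
  · exfalso
    have g1' := hB.mpr (key.mp (hA.mp h1))
    rw [g0] at g1'
    exact absurd g1' (by norm_num)
  · rw [h1, g1]
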